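-- pv_equiv track=rewrite | github.com/KonstantinManuylov/python_00 | seminar_00/dz02.py | find_right_side_sum
-- ===== SOURCE A (Python) =====
-- def find_right_side_sum(number: int):
--     number = number % 1000
--     sum = 0
--     while number != 0:
--         left = number % 10
--         number = number // 10
--         sum = sum + left
--     return sum
-- ===== SOURCE B (Python) =====
-- def find_right_side_sum(number: int):
--     return sum(int(ch) for ch in str(number % 1000))
-- ===== Notes on version B (the rewrite author's own statement) =====
-- stated objective: idiomatic
-- what changed: Replaces the right-to-left %10 / //10 extraction loop with a left-to-right pass over the decimal string of number % 1000, summing int(ch) per character.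
import Mathlib
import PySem

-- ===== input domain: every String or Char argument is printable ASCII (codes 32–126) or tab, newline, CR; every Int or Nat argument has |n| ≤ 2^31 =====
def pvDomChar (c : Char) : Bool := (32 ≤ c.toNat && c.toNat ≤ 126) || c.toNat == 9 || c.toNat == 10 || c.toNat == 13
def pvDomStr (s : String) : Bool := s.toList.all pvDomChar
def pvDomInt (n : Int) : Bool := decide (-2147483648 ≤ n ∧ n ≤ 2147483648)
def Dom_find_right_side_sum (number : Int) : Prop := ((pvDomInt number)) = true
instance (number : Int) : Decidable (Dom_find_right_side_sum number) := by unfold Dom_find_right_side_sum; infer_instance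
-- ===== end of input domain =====

-- B replaces A's right-to-left %10 / //10 extraction loop by summing the digit characters of str(number % 1000); same value, more idiomatic.


-- ===== PORT A =====
-- the while loop; fuel = n.toNat bounds the iteration count (each step divides a
-- nonnegative n by 10), only making the recursion total — the loop body is unchanged
def pvA_loop : Nat → Int → Int → Int
  | 0, _, s => s
  | fuel + 1, n, s =>
    if n ≠ 0 then
      pvA_loop fuel (PySem.Int.floordiv n 10) (s + PySem.Int.mod n 10)
    else s

def find_right_side_sum (number : Int) : Int :=
  let m := PySem.Int.mod number 1000
  pvA_loop m.toNat m 0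

-- ===== PORT B =====
-- int(ch) for a single decimal digit character: its code minus 48 (exact on '0'..'9',
-- the only characters str(m) produces for m = number % 1000 ≥ 0)
def pvB_digit (c : Char) : Int := (c.toNat : Int) - 48

def find_right_side_sum_alt (number : Int) : Int :=
  ((PySem.Int.toStr (PySem.Int.mod number 1000)).toList.map pvB_digit).sum

-- ===== PRECONDITION & SPEC =====
def Spec_find_right_side_sum (number : Int) (out : Int) : Prop := out = find_right_side_sum_alt number
instance (number : Int) (out : Int) : Decidable (Spec_find_right_side_sum number out) := by unfold Spec_find_right_side_sum; infer_instance

-- ===== CLAIM (what is proved, stated in full; the proofs are below) =====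
def Claim_equal_find_right_side_sum : Prop := ∀ (number : Int), Dom_find_right_side_sum number → Spec_find_right_side_sum number (find_right_side_sum number)

-- ===== LEMMAS AND PROOFS =====

-- both sides depend on the input only through m = number % 1000 ∈ [0, 1000): check all 1000 cases
theorem pv_agree_lt_1000 : ∀ m : Nat, m < 1000 →
    (pvA_loop m (m : Int) 0 ==
      ((PySem.Int.toStr (m : Int)).toList.map pvB_digit).sum) = true := by
  set_option maxRecDepth 4096 in decide

theorem pv_mod_eq_cast (number : Int) :
    PySem.Int.mod number 1000 = ((PySem.Int.mod number 1000).toNat : Int) :=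
  (Int.toNat_of_nonneg (PySem.Int.mod_nonneg number (by norm_num))).symm

-- ===== VERDICT (by name: the statement is the Claim_ definition above) =====
theorem find_right_side_sum_spec : Claim_equal_find_right_side_sum := by
  intro number _
  unfold Spec_find_right_side_sum find_right_side_sum find_right_side_sum_alt
  have hlt : (PySem.Int.mod number 1000).toNat < 1000 := by
    have h := PySem.Int.mod_lt number (b := 1000) (by norm_num)
    omega
  have h := pv_agree_lt_1000 (PySem.Int.mod number 1000).toNat hlt
  rw [pv_mod_eq_cast number]
  simp only [Int.toNat_natCast]
  exact of_decide_eq_true h
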